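-- pv_equiv track=rewrite | github.com/mjhaahr/Advent-of-Code-2024 | puzzles/day-02/solution.py | parseReport
-- ===== SOURCE A (Python) =====
-- def parseReport(report):
--     errorIdx = -1
--     first = True
--     isIncr = True
--
--     for idx, (level1, level2) in enumerate(zip(report, report[1:])):
--         delta = level1 - level2
--         diff = abs(delta)
--         if diff < 1 or diff > 3:
--             errorIdx = idx
--             break
--
--         currIncr = delta > 0
--         if first:
--             isIncr = currIncr
--             first = False
--         elif currIncr != isIncr:
--             errorIdx = idx
--             break
--
--     return errorIdx
-- ===== SOURCE B (Python) =====
-- def parseReport(report):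
--     deltas = [a - b for a, b in zip(report, report[1:])]
--     n = len(deltas)
--     if n == 0:
--         return -1
--     magErr = next((i for i, d in enumerate(deltas) if abs(d) < 1 or abs(d) > 3), n)
--     sign0 = deltas[0] > 0
--     dirErr = next((i for i in range(1, n) if (deltas[i] > 0) != sign0), n)
--     err = min(magErr, dirErr)
--     return err if err < n else -1
-- ===== Notes on version B (the rewrite author's own statement) =====
-- stated objective: alternative
-- what changed: Replaces the single interleaved loop with boolean state (first/isIncr) and early break by building the delta list once and combining two independent first-failure searches (magnitude, direction) with min.
import Mathlib
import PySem

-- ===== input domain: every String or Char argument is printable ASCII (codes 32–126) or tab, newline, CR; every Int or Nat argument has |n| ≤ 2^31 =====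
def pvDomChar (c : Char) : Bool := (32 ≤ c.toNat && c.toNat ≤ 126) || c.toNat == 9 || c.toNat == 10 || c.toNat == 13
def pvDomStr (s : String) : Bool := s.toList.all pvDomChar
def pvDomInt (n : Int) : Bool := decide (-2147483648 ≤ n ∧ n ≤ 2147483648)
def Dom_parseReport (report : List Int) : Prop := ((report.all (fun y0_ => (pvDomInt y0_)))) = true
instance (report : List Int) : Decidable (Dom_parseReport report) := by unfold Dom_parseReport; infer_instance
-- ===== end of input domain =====

-- B replaces A's single interleaved loop with state by two independent first-failure scans combined with min (objective: alternative decomposition).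

-- ===== PORT A =====
-- the for-loop over enumerate(zip(report, report[1:])) with `break`, as structural recursion over the pair list
def parseReportLoop : List (Int × Int) → Int → Bool → Bool → Int
  | [], _, _, _ => -1
  | (l1, l2) :: rest, idx, first, isIncr =>
    let delta := l1 - l2
    let diff := |delta|
    if diff < 1 ∨ diff > 3 then idx
    else
      let currIncr := decide (delta > 0)
      if first then parseReportLoop rest (idx + 1) false currIncr
      else if currIncr ≠ isIncr then idx
      else parseReportLoop rest (idx + 1) first isIncr

def parseReport (report : List Int) : Int :=
  parseReportLoop (report.zip (report.drop 1)) 0 true true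

-- ===== PORT B =====
-- first index i with |deltas[i]| outside [1,3]; sentinel = deltas.length
def magIdx : List Int → Nat
  | [] => 0
  | d :: rest => if |d| < 1 ∨ |d| > 3 then 0 else 1 + magIdx rest

-- first offset into the scanned suffix whose delta's direction differs from sign0; sentinel = length
def dirIdx (sign0 : Bool) : List Int → Nat
  | [] => 0
  | d :: rest => if (decide (d > 0)) ≠ sign0 then 0 else 1 + dirIdx sign0 rest

def parseReport_alt (report : List Int) : Int :=
  let deltas := List.zipWith (fun a b => a - b) report (report.drop 1)
  match deltas with
  | [] => -1
  | d0 :: rest =>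
    let n := deltas.length
    let magErr := magIdx deltas
    let dirErr := 1 + dirIdx (decide (d0 > 0)) rest
    let err := min magErr dirErr
    if err < n then (err : Int) else -1

-- ===== PRECONDITION & SPEC =====
def Spec_parseReport (report : List Int) (out : Int) : Prop := out = parseReport_alt report
instance (report : List Int) (out : Int) : Decidable (Spec_parseReport report out) := by unfold Spec_parseReport; infer_instance

-- ===== CLAIM (what is proved, stated in full; the proofs are below) =====
def Claim_equal_parseReport : Prop := ∀ (report : List Int), Dom_parseReport report → Spec_parseReport report (parseReport report)

-- ===== LEMMAS AND PROOFS =====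

-- Once `first` is false with direction reference s, A's loop returns start + the first combined
-- failure offset (min of magnitude and direction failure), or -1 if none.
theorem loop_eq (ps : List (Int × Int)) (s : Bool) (k : Int) :
    parseReportLoop ps k false s =
      (if min (magIdx (ps.map (fun p => p.1 - p.2))) (dirIdx s (ps.map (fun p => p.1 - p.2)))
            < (ps.map (fun p => p.1 - p.2)).length
       then k + (min (magIdx (ps.map (fun p => p.1 - p.2)))
                     (dirIdx s (ps.map (fun p => p.1 - p.2))) : Int)
       else -1) := by
  induction ps generalizing k with
  | nil => simp [parseReportLoop]
  | cons p rest ih =>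
    obtain ⟨l1, l2⟩ := p
    by_cases hm : |l1 - l2| < 1 ∨ |l1 - l2| > 3
    · simp only [parseReportLoop, List.map_cons, magIdx, dirIdx, List.length_cons,
        if_pos hm, Bool.false_eq_true, if_false]
      split_ifs <;> omega
    · by_cases hd : (decide (l1 - l2 > 0)) ≠ s
      · simp only [parseReportLoop, List.map_cons, magIdx, dirIdx, List.length_cons,
          if_neg hm, Bool.false_eq_true, if_false, if_pos hd]
        split_ifs <;> omega
      · simp only [parseReportLoop, List.map_cons, magIdx, dirIdx, List.length_cons,
          if_neg hm, Bool.false_eq_true, if_false, if_neg hd]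
        rw [ih (k + 1)]
        split_ifs <;> omega

theorem zipWith_eq_map_zip (xs ys : List Int) :
    List.zipWith (fun a b => a - b) xs ys = (xs.zip ys).map (fun p => p.1 - p.2) := by
  induction xs generalizing ys with
  | nil => simp
  | cons x xs ih => cases ys <;> simp [ih]

-- ===== VERDICT (by name: the statement is the Claim_ definition above) =====
theorem parseReport_spec : Claim_equal_parseReport := by
  intro report _
  unfold Spec_parseReport parseReport parseReport_alt
  rw [zipWith_eq_map_zip]
  cases hz : report.zip (report.drop 1) with
  | nil => simp [parseReportLoop]
  | cons p ps =>
    obtain ⟨l1, l2⟩ := p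
    by_cases hm : |l1 - l2| < 1 ∨ |l1 - l2| > 3
    · simp only [List.map_cons, parseReportLoop, magIdx, List.length_cons, if_pos hm]
      split_ifs <;> omega
    · simp only [List.map_cons, parseReportLoop, magIdx, List.length_cons,
        if_neg hm]
      rw [loop_eq]
      split_ifs <;> omega
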